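-- pv_equiv track=rewrite | github.com/TheAlgorithms/Python | boolean_algebra/imply_gate.py | recursive_imply_list
-- ===== SOURCE A (Python) =====
-- def imply_gate(input_1: int, input_2: int) -> int:
--     """
--     Calculate IMPLY of the input values
--
--     >>> imply_gate(0, 0)
--     1
--     >>> imply_gate(0, 1)
--     1
--     >>> imply_gate(1, 0)
--     0
--     >>> imply_gate(1, 1)
--     1
--     """
--     return int(input_1 == 0 or input_2 == 1)
--
-- def recursive_imply_list(input_list: list[int]) -> int:
--     """
--     Recursively calculates the implication of a list.
--     Strictly the implication is applied consecutively left to right: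
--     ( (a -> b) -> c ) -> d ...
--
--     >>> recursive_imply_list([])
--     Traceback (most recent call last):
--         ...
--     ValueError: Input list must contain at least two elements
--     >>> recursive_imply_list([0])
--     Traceback (most recent call last):
--         ...
--     ValueError: Input list must contain at least two elements
--     >>> recursive_imply_list([1])
--     Traceback (most recent call last):
--         ...
--     ValueError: Input list must contain at least two elements
--     >>> recursive_imply_list([0, 0])
--     1
--     >>> recursive_imply_list([0, 1])
--     1
--     >>> recursive_imply_list([1, 0])
--     0
--     >>> recursive_imply_list([1, 1])
--     1
--     >>> recursive_imply_list([0, 0, 0])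
--     0
--     >>> recursive_imply_list([0, 0, 1])
--     1
--     >>> recursive_imply_list([0, 1, 0])
--     0
--     >>> recursive_imply_list([0, 1, 1])
--     1
--     >>> recursive_imply_list([1, 0, 0])
--     1
--     >>> recursive_imply_list([1, 0, 1])
--     1
--     >>> recursive_imply_list([1, 1, 0])
--     0
--     >>> recursive_imply_list([1, 1, 1])
--     1
--     """
--     if len(input_list) < 2:
--         raise ValueError("Input list must contain at least two elements")
--     first_implication = imply_gate(input_list[0], input_list[1])
--     if len(input_list) == 2:
--         return first_implication
--     new_list = [first_implication, *input_list[2:]]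
--     return recursive_imply_list(new_list)
-- ===== SOURCE B (Python) =====
-- def recursive_imply_list(input_list: list[int]) -> int:
--     if len(input_list) < 2:
--         raise ValueError("Input list must contain at least two elements")
--     acc = input_list[0]
--     for x in input_list[1:]:
--         acc = 0 if acc != 0 and x != 1 else 1
--     return acc
-- ===== Notes on version B (the rewrite author's own statement) =====
-- stated objective: faster
-- what changed: Replaces the recursion that rebuilds a fresh list on every step with a single-pass iterative left fold over the list.
import Mathlib
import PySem

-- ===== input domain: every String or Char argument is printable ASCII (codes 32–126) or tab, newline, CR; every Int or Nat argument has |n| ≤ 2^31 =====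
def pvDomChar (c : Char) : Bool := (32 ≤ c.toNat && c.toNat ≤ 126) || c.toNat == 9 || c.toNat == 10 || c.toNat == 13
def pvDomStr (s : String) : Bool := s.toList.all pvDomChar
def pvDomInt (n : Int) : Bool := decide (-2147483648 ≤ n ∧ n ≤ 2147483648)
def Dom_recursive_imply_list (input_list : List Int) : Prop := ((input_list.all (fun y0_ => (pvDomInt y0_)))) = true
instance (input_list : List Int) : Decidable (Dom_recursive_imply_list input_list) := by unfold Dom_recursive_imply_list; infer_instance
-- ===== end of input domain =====

-- B replaces A's list-rebuilding recursion with a single-pass iterative left fold (asymptotically faster).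


-- ===== PORT A =====
def imply_gate (input_1 input_2 : Int) : Int :=
  if input_1 = 0 ∨ input_2 = 1 then 1 else 0

-- literal port of A: compute the first implication, rebuild the list, recurse
def recursive_imply_list : List Int → Int
  | [a, b] => imply_gate a b
  | a :: b :: c :: rest => recursive_imply_list (imply_gate a b :: c :: rest)
  | _ => 0  -- unreachable under Pre_ (Python raises ValueError on len < 2)
termination_by l => l.length

-- ===== PORT B =====
-- B: single left fold starting from the raw first element; inline imply step
def recursive_imply_list_alt (input_list : List Int) : Int :=
  match input_list with
  | x :: rest => rest.foldl (fun acc y => if acc ≠ 0 ∧ y ≠ 1 then 0 else 1) x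
  | [] => 0  -- unreachable under Pre_ (Python raises ValueError on len < 2)

-- ===== PRECONDITION & SPEC =====
-- Pre_ excludes exactly the inputs of length < 2, on which Python A raises ValueError.
def Pre_recursive_imply_list (input_list : List Int) : Prop := 2 ≤ input_list.length
instance (input_list : List Int) : Decidable (Pre_recursive_imply_list input_list) := by unfold Pre_recursive_imply_list; infer_instance
def pvWitness_recursive_imply_list : List Int := [1, 0, 1]

def Spec_recursive_imply_list (input_list : List Int) (out : Int) : Prop := out = recursive_imply_list_alt input_list
instance (input_list : List Int) (out : Int) : Decidable (Spec_recursive_imply_list input_list out) := by unfold Spec_recursive_imply_list; infer_instance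

-- ===== CLAIM (what is proved, stated in full; the proofs are below) =====
def Claim_equal_recursive_imply_list : Prop := ∀ (input_list : List Int), Dom_recursive_imply_list input_list → Pre_recursive_imply_list input_list → Spec_recursive_imply_list input_list (recursive_imply_list input_list)

-- ===== LEMMAS AND PROOFS =====
lemma imply_fold (rest : List Int) : ∀ (a b : Int),
    recursive_imply_list (a :: b :: rest)
      = rest.foldl (fun acc y => if acc ≠ 0 ∧ y ≠ 1 then 0 else 1) (imply_gate a b) := by
  induction rest with
  | nil => intro a b; simp [recursive_imply_list]
  | cons c rest ih =>
      intro a b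
      rw [recursive_imply_list, ih]
      simp only [List.foldl]
      congr 1
      by_cases h1 : a = 0 <;> by_cases h2 : b = 1 <;>
        simp [imply_gate, h1, h2]

-- ===== VERDICT (by name: the statement is the Claim_ definition above) =====
theorem recursive_imply_list_spec : Claim_equal_recursive_imply_list := by
  intro l _ hpre
  match l with
  | a :: b :: rest =>
      unfold Spec_recursive_imply_list recursive_imply_list_alt
      rw [imply_fold rest a b]
      simp only [List.foldl]
      congr 1
      by_cases h1 : a = 0 <;> by_cases h2 : b = 1 <;>
        simp [imply_gate, h1, h2]
  | [] => simp [Pre_recursive_imply_list] at hpre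
  | [a] => simp [Pre_recursive_imply_list] at hpre
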